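-- pv_equiv track=rewrite | github.com/divinepromise/lab_2 | task14.py | triple_double_count
-- ===== SOURCE A (Python) =====
-- def triple_double_count(word):
--
-- 	count = 0
-- 	index = 0
-- 	while index < len(word)-1:
-- 		if word[index] == word[index+1]:
-- 			count += 1
-- 			if count == 3:
-- 				return True
-- 			index+=2
-- 		else:
-- 			index += 1
-- 	return False
-- ===== SOURCE B (Python) =====
-- import re
--
-- def triple_double_count(word):
--     return len(re.findall(r'(.)\1', word, re.DOTALL)) >= 3
-- ===== Notes on version B (the rewrite author's own statement) =====
-- stated objective: idiomatic
-- what changed: Replaces the hand-written while-loop with index jumps and early exit by a single regex call: count non-overlapping adjacent equal pairs with re.findall(r'(.)\1', word, re.DOTALL) and compare the count to 3.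
import Mathlib
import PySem

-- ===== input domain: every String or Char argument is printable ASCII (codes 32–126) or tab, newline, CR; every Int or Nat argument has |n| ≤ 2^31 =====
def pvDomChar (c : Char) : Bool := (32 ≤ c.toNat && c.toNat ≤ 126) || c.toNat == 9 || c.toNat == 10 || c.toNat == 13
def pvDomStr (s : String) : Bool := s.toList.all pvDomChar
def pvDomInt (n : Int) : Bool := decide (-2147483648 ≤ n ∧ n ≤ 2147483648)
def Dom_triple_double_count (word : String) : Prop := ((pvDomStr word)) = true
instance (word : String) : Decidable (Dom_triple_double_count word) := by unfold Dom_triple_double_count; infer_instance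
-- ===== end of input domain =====

-- B replaces A's manual index-jump loop with a regex count of non-overlapping adjacent
-- equal pairs compared to 3 (objective: idiomatic; same result, proved equal below).

-- ===== PORT A =====
-- A's while-loop: state (count, index), index jumps by 2 on a pair (early True at count 3),
-- by 1 otherwise; terminates when index ≥ len(word)-1.
def tdcLoopA (cs : List Char) (count index : Nat) : Bool :=
  if h : index < cs.length - 1 then
    if cs[index]'(by omega) = cs[index + 1]'(by omega) then
      if count + 1 = 3 then true
      else tdcLoopA cs (count + 1) (index + 2)
    else tdcLoopA cs count (index + 1)
  else false
termination_by cs.length - index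
decreasing_by all_goals omega

def triple_double_count (word : String) : Bool :=
  tdcLoopA word.toList 0 0

-- ===== PORT B =====
-- The regex engine's left-to-right non-overlapping matching of r'(.)\1' (DOTALL): at each
-- position try to match two equal adjacent characters; on a match resume after it, else
-- advance one character.  countPairs = len(re.findall(...)).
def tdcCountPairs : List Char → Nat
  | c1 :: c2 :: rest =>
    if c1 = c2 then tdcCountPairs rest + 1 else tdcCountPairs (c2 :: rest)
  | _ => 0

def triple_double_count_alt (word : String) : Bool :=
  decide (3 ≤ tdcCountPairs word.toList)

-- ===== PRECONDITION & SPEC =====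
def Spec_triple_double_count (word : String) (out : Bool) : Prop := out = triple_double_count_alt word
instance (word : String) (out : Bool) : Decidable (Spec_triple_double_count word out) := by unfold Spec_triple_double_count; infer_instance

-- ===== CLAIM (what is proved, stated in full; the proofs are below) =====
def Claim_equal_triple_double_count : Prop := ∀ (word : String), Dom_triple_double_count word → Spec_triple_double_count word (triple_double_count word)

-- ===== LEMMAS AND PROOFS =====

lemma tdcCountPairs_short (l : List Char) (h : l.length ≤ 1) : tdcCountPairs l = 0 := by
  match l with
  | [] => rfl
  | [c] => rfl
  | c1 :: c2 :: rest => simp at h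

lemma tdcLoopA_eq : ∀ (n : Nat) (cs : List Char) (index count : Nat),
    cs.length - index ≤ n → count < 3 →
    tdcLoopA cs count index = decide (3 ≤ count + tdcCountPairs (cs.drop index)) := by
  intro n
  induction n with
  | zero =>
    intro cs index count hn hc
    rw [tdcLoopA]
    have h1 : ¬ index < cs.length - 1 := by omega
    rw [dif_neg h1]
    have : tdcCountPairs (cs.drop index) = 0 := by
      apply tdcCountPairs_short; simp; omega
    simp [this]; omega
  | succ n ih =>
    intro cs index count hn hc
    rw [tdcLoopA]
    by_cases h1 : index < cs.length - 1
    · rw [dif_pos h1]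
      have hi : index < cs.length := by omega
      have hi1 : index + 1 < cs.length := by omega
      have hd : cs.drop index = cs[index] :: cs[index + 1] :: cs.drop (index + 2) := by
        rw [List.drop_eq_getElem_cons hi, List.drop_eq_getElem_cons hi1]
      by_cases he : cs[index] = cs[index + 1]
      · rw [if_pos he]
        by_cases h3 : count + 1 = 3
        · rw [if_pos h3]
          rw [hd, tdcCountPairs, if_pos he]
          simp; omega
        · rw [if_neg h3]
          rw [ih cs (index + 2) (count + 1) (by omega) (by omega)]
          rw [hd, tdcCountPairs, if_pos he]
          simp; omega
      · rw [if_neg he]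
        rw [ih cs (index + 1) count (by omega) hc]
        have hd1 : cs.drop (index + 1) = cs[index + 1] :: cs.drop (index + 2) := by
          rw [List.drop_eq_getElem_cons hi1]
        rw [hd, hd1, tdcCountPairs, if_neg he]
    · rw [dif_neg h1]
      have : tdcCountPairs (cs.drop index) = 0 := by
        apply tdcCountPairs_short; simp; omega
      simp [this]; omega

theorem triple_double_count_spec : Claim_equal_triple_double_count := by
  intro word _
  unfold Spec_triple_double_count triple_double_count triple_double_count_alt
  simpa using tdcLoopA_eq word.toList.length word.toList 0 0 (by omega) (by omega)
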